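-- pv_equiv track=rewrite | github.com/lancelote/advent_of_code | src/year2022/day16a.py | left_score
-- ===== SOURCE A (Python) =====
-- from typing import AbstractSet
--
-- def left_score(
--     flow_rates: dict[str, int],
--     released_valves: AbstractSet[str],
--     minute: int = 0,
-- ) -> int:
--     total_score = 0
--
--     for valve, score in flow_rates.items():
--         if valve not in released_valves:
--             total_score += score * minute
--
--     return total_score
-- ===== SOURCE B (Python) =====
-- def left_score(flow_rates, released_valves, minute=0):
--     total = sum(flow_rates.values())
--     released_total = 0
--     for v in released_valves:
--         released_total += flow_rates.get(v, 0)
--     return minute * (total - released_total)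
-- ===== Notes on version B (the rewrite author's own statement) =====
-- stated objective: alternative
-- what changed: B computes minute*(total of all flow rates minus the released valves' rates looked up over the released set) instead of A's filtered pass over flow_rates; the loop runs over released_valves, not flow_rates.
import Mathlib
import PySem

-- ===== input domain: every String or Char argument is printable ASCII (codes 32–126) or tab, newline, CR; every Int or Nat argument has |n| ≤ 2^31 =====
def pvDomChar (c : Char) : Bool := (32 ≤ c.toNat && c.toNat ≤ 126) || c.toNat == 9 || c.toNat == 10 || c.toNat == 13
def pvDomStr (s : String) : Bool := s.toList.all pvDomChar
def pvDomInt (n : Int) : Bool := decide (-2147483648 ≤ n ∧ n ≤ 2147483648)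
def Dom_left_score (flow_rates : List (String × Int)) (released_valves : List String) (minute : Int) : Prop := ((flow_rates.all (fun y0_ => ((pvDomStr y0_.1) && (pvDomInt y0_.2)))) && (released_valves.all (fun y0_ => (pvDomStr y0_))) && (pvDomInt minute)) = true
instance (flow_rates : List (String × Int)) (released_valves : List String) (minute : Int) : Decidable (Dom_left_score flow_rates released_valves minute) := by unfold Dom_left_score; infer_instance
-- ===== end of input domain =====

-- B replaces A's filtered pass over flow_rates by total-minus-released: minute * (sum of all rates - sum of released rates looked up over the released set); same cost, different decomposition.


-- ===== PORT A =====
-- for valve, score in flow_rates.items(): if valve not in released_valves: total_score += score * minute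
def left_score (flow_rates : List (String × Int)) (released_valves : List String) (minute : Int) : Int :=
  flow_rates.foldl
    (fun total_score p =>
      if released_valves.contains p.1 then total_score else total_score + p.2 * minute)
    0

-- ===== PORT B =====
def left_score_alt (flow_rates : List (String × Int)) (released_valves : List String) (minute : Int) : Int :=
  let d : PySem.Dict String Int := PySem.Dict.mk flow_rates
  let total : Int := (flow_rates.map Prod.snd).sum
  let released_total : Int :=
    released_valves.foldl (fun acc v => acc + PySem.Dict.getD d v 0) 0
  minute * (total - released_total)

-- ===== PRECONDITION & SPEC =====
-- Pre_ restricts the Lean encodings to valid images of A's Python types: flow_rates encodes a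
-- dict (distinct keys) and released_valves a set (distinct elements); duplicate-carrying lists
-- do not correspond to any Python input of A.
def Pre_left_score (flow_rates : List (String × Int)) (released_valves : List String) (minute : Int) : Prop :=
  (flow_rates.map Prod.fst).Nodup ∧ released_valves.Nodup
instance (flow_rates : List (String × Int)) (released_valves : List String) (minute : Int) : Decidable (Pre_left_score flow_rates released_valves minute) := by unfold Pre_left_score; infer_instance
def pvWitness_left_score : (List (String × Int)) × List String × Int := ([("AA", 3), ("BB", 5)], ["BB", "CC"], 4)

def Spec_left_score (flow_rates : List (String × Int)) (released_valves : List String) (minute : Int) (out : Int) : Prop := out = left_score_alt flow_rates released_valves minute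
instance (flow_rates : List (String × Int)) (released_valves : List String) (minute : Int) (out : Int) : Decidable (Spec_left_score flow_rates released_valves minute out) := by unfold Spec_left_score; infer_instance

-- ===== CLAIM (what is proved, stated in full; the proofs are below) =====
def Claim_equal_left_score : Prop := ∀ (flow_rates : List (String × Int)) (released_valves : List String) (minute : Int), Dom_left_score flow_rates released_valves minute → Pre_left_score flow_rates released_valves minute → Spec_left_score flow_rates released_valves minute (left_score flow_rates released_valves minute)

-- ===== LEMMAS AND PROOFS =====

-- A's fold with an arbitrary accumulator
lemma foldA_acc (rv : List String) (m : Int) :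
    ∀ (fr : List (String × Int)) (a : Int),
      fr.foldl (fun t p => if rv.contains p.1 then t else t + p.2 * m) a
        = a + fr.foldl (fun t p => if rv.contains p.1 then t else t + p.2 * m) 0 := by
  intro fr
  induction fr with
  | nil => intro a; simp
  | cons p fr ih =>
    intro a
    simp only [List.foldl_cons]
    by_cases h : rv.contains p.1 = true
    · simp only [h, if_true]
      exact ih a
    · simp only [Bool.not_eq_true] at h
      simp only [h, Bool.false_eq_true, if_false]
      rw [ih (a + p.2 * m), ih (0 + p.2 * m)]
      ring

lemma sum_if (rv : List String) (k : String) (s : Int) (g : String → Int) (hnd : rv.Nodup) :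
    (rv.map (fun v => if k == v then s else g v)).sum
      = (rv.map g).sum + (if rv.contains k then s - g k else 0) := by
  induction rv with
  | nil => simp
  | cons x xs ih =>
    simp only [List.nodup_cons] at hnd
    simp only [List.map_cons, List.sum_cons, List.contains_cons]
    by_cases hx : k = x
    · subst hx
      have hxk : xs.contains k = false := by
        simp only [List.contains_eq_mem, decide_eq_false_iff_not]
        exact hnd.1
      have hmap : List.map (fun v => if (k == v) = true then s else g v) xs
          = List.map g xs := by
        apply List.map_congr_left
        intro v hv
        have : (k == v) = false := by
          simp only [beq_eq_false_iff_ne, ne_eq]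
          rintro rfl; exact hnd.1 hv
        simp [this]
      simp only [hmap, beq_self_eq_true, if_true, hxk, Bool.or_false]
      ring
    · have h1 : (k == x) = false := by simp [hx]
      have h2 : (x == k) = false := by simp [Ne.symm hx]
      simp only [h1, h2, Bool.false_eq_true, if_false, Bool.false_or, ih hnd.2]
      ring

lemma getD_cons (k : String) (s : Int) (fr : List (String × Int)) (v : String) :
    PySem.Dict.getD (PySem.Dict.mk ((k, s) :: fr)) v 0
      = if k == v then s else PySem.Dict.getD (PySem.Dict.mk fr) v 0 := by
  rw [PySem.Dict.getD_eq_get?_getD, PySem.Dict.get?_mk_cons]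
  by_cases h : (k == v) = true
  · simp [h]
  · simp only [Bool.not_eq_true] at h
    simp [h, PySem.Dict.getD_eq_get?_getD]

lemma getD_not_key (fr : List (String × Int)) (k : String)
    (h : ¬ k ∈ fr.map Prod.fst) : PySem.Dict.getD (PySem.Dict.mk fr) k 0 = 0 := by
  apply PySem.Dict.getD_of_not_contains
  simp only [PySem.Dict.contains_mk]
  simp only [List.mem_map] at h
  simp only [List.any_eq_false]
  intro p hp hbe
  exact h ⟨p, hp, by simpa using hbe⟩

lemma main_eq (rv : List String) (m : Int) (hrv : rv.Nodup) :
    ∀ (fr : List (String × Int)), (fr.map Prod.fst).Nodup →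
      fr.foldl (fun t p => if rv.contains p.1 then t else t + p.2 * m) 0
        = m * ((fr.map Prod.snd).sum
            - (rv.map (fun v => PySem.Dict.getD (PySem.Dict.mk fr) v 0)).sum) := by
  intro fr
  induction fr with
  | nil =>
    intro _
    have hz : rv.map (fun v => PySem.Dict.getD (PySem.Dict.mk ([] : List (String × Int))) v 0)
        = rv.map (fun _ => (0 : Int)) := List.map_congr_left (fun v _ => rfl)
    simp [hz]
  | cons p fr ih =>
    intro hnd
    obtain ⟨k, s⟩ := p
    simp only [List.map_cons, List.nodup_cons] at hnd
    have hmap : (rv.map (fun v => PySem.Dict.getD (PySem.Dict.mk ((k, s) :: fr)) v 0))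
        = rv.map (fun v => if k == v then s else PySem.Dict.getD (PySem.Dict.mk fr) v 0) := by
      apply List.map_congr_left; intro v _; exact getD_cons k s fr v
    simp only [List.foldl_cons, List.map_cons, List.sum_cons, hmap]
    rw [sum_if rv k s _ hrv, getD_not_key fr k hnd.1]
    rw [foldA_acc, ih hnd.2]
    by_cases h : rv.contains k = true
    · simp only [h, if_true]
      ring
    · simp only [Bool.not_eq_true] at h
      simp only [h]
      simp only [Bool.false_eq_true, if_false]
      ring

-- ===== VERDICT (by name: the statement is the Claim_ definition above) =====
theorem left_score_spec : Claim_equal_left_score := by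
  intro fr rv m _ hpre
  unfold Spec_left_score left_score
  rw [main_eq rv m hpre.2 fr hpre.1]
  have halt : left_score_alt fr rv m
      = m * ((fr.map Prod.snd).sum
          - rv.foldl (fun acc v => acc + PySem.Dict.getD (PySem.Dict.mk fr) v 0) 0) := rfl
  rw [halt, PySem.List.foldl_add]
  simp
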